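-- pv_equiv track=rewrite | github.com/LiamHardman/fm-dash | calc.py | assign_weak_foot
-- ===== SOURCE A (Python) =====
-- def assign_weak_foot(left_foot_rating, right_foot_rating):
--     """
--     Assigns a description to the weak foot strength based on the ratings of the left and right foot.
--
--     Args:
--         left_foot_rating (str): The rating of the left foot.
--         right_foot_rating (str): The rating of the right foot.
--
--     Returns:
--         str: The description of the weak foot strength. Possible values are:
--             - "Very Strong"
--             - "Strong"
--             - "Fairly Strong"
--             - "Reasonable"
--             - "Fairly Weak"
--             - "Weak"
--             - "Very Weak"
--             - "Unknown" if the ratings are not found in the scale.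
--     """
--     scale = {
--         "Very Strong": 7,
--         "Strong": 6,
--         "Fairly Strong": 5,
--         "Reasonable": 4,
--         "Fairly Weak": 3,
--         "Weak": 2,
--         "Very Weak": 1,
--     }
--
--     left = scale.get(left_foot_rating, 0)
--     right = scale.get(right_foot_rating, 0)
--     weak_foot_strength = min(left, right)
--     for desc, val in scale.items():
--         if val == weak_foot_strength:
--             return desc
--
--     return "Unknown"
-- ===== SOURCE B (Python) =====
-- def assign_weak_foot(left_foot_rating, right_foot_rating):
--     scale = {
--         "Very Strong": 7,
--         "Strong": 6,
--         "Fairly Strong": 5,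
--         "Reasonable": 4,
--         "Fairly Weak": 3,
--         "Weak": 2,
--         "Very Weak": 1,
--     }
--     left = scale.get(left_foot_rating, 0)
--     right = scale.get(right_foot_rating, 0)
--     if left == 0 or right == 0:
--         return "Unknown"
--     # each valid rating string is its own canonical description, so the
--     # weaker foot's own rating is the answer; no reverse scan needed
--     return left_foot_rating if left <= right else right_foot_rating
-- ===== Notes on version B (the rewrite author's own statement) =====
-- stated objective: simpler
-- what changed: B drops A's reverse value-to-description scan over the dict: since the scale is injective and every valid input is its own canonical description, B returns the weaker foot's own rating directly (or 'Unknown' when a rating is unrecognised).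
import Mathlib
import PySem

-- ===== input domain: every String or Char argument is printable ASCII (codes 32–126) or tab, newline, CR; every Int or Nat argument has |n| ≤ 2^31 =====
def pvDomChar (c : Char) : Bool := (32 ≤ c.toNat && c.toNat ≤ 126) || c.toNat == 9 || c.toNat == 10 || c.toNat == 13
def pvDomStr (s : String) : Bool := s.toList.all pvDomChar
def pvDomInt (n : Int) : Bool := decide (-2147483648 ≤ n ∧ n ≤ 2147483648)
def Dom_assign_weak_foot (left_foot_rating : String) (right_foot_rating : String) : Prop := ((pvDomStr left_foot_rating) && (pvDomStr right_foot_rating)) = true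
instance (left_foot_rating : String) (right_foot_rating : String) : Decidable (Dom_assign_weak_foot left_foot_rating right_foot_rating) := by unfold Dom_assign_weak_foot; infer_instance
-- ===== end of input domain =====

-- B replaces A's reverse value-to-description scan with a direct return of the weaker
-- foot's own rating string (objective: simpler); "Unknown" when a rating is unrecognised.


-- ===== PORT A =====
-- the literal scale dict (shared source text of both Pythons)
def pvScale : PySem.Dict String Int :=
  PySem.Dict.mk
    [("Very Strong", 7), ("Strong", 6), ("Fairly Strong", 5), ("Reasonable", 4),
     ("Fairly Weak", 3), ("Weak", 2), ("Very Weak", 1)]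

-- A's 'for desc, val in scale.items(): if val == weak: return desc' loop
def pvFindDesc : List (String × Int) → Int → Option String
  | [], _ => none
  | (desc, val) :: rest, w => if val == w then some desc else pvFindDesc rest w

def assign_weak_foot (left_foot_rating : String) (right_foot_rating : String) : String :=
  let left := PySem.Dict.getD pvScale left_foot_rating 0
  let right := PySem.Dict.getD pvScale right_foot_rating 0
  let weak_foot_strength := if left ≤ right then left else right  -- min(left, right)
  match pvFindDesc pvScale.items weak_foot_strength with
  | some desc => desc
  | none => "Unknown"

-- ===== PORT B =====
def assign_weak_foot_alt (left_foot_rating : String) (right_foot_rating : String) : String :=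
  let left := PySem.Dict.getD pvScale left_foot_rating 0
  let right := PySem.Dict.getD pvScale right_foot_rating 0
  if left == 0 || right == 0 then "Unknown"
  else if left ≤ right then left_foot_rating else right_foot_rating

-- ===== PRECONDITION & SPEC =====
def Spec_assign_weak_foot (left_foot_rating : String) (right_foot_rating : String) (out : String) : Prop := out = assign_weak_foot_alt left_foot_rating right_foot_rating
instance (left_foot_rating : String) (right_foot_rating : String) (out : String) : Decidable (Spec_assign_weak_foot left_foot_rating right_foot_rating out) := by unfold Spec_assign_weak_foot; infer_instance

-- ===== CLAIM (what is proved, stated in full; the proofs are below) =====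
def Claim_equal_assign_weak_foot : Prop := ∀ (left_foot_rating : String) (right_foot_rating : String), Dom_assign_weak_foot left_foot_rating right_foot_rating → Spec_assign_weak_foot left_foot_rating right_foot_rating (assign_weak_foot left_foot_rating right_foot_rating)

-- ===== LEMMAS AND PROOFS =====

-- the scale lookup yields 0 (unknown string) or one of the seven (rank, key) pairs,
-- and in the latter case the string IS the canonical description for that rank
theorem pvRank_cases (s : String) :
    PySem.Dict.getD pvScale s 0 = 0 ∨
    (PySem.Dict.getD pvScale s 0 = 7 ∧ s = "Very Strong") ∨
    (PySem.Dict.getD pvScale s 0 = 6 ∧ s = "Strong") ∨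
    (PySem.Dict.getD pvScale s 0 = 5 ∧ s = "Fairly Strong") ∨
    (PySem.Dict.getD pvScale s 0 = 4 ∧ s = "Reasonable") ∨
    (PySem.Dict.getD pvScale s 0 = 3 ∧ s = "Fairly Weak") ∨
    (PySem.Dict.getD pvScale s 0 = 2 ∧ s = "Weak") ∨
    (PySem.Dict.getD pvScale s 0 = 1 ∧ s = "Very Weak") := by
  simp [pvScale, PySem.Dict.getD, PySem.Dict.get?_mk_cons]
  split_ifs with h1 h2 h3 h4 h5 h6 h7 <;> subst_vars <;> simp [PySem.Dict.get?]

-- ===== VERDICT (by name: the statement is the Claim_ definition above) =====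
theorem assign_weak_foot_spec : Claim_equal_assign_weak_foot := by
  intro l r _
  unfold Spec_assign_weak_foot assign_weak_foot assign_weak_foot_alt
  rcases pvRank_cases l with hl | ⟨hl, rfl⟩ | ⟨hl, rfl⟩ | ⟨hl, rfl⟩ | ⟨hl, rfl⟩ | ⟨hl, rfl⟩ | ⟨hl, rfl⟩ | ⟨hl, rfl⟩ <;>
    rcases pvRank_cases r with hr | ⟨hr, rfl⟩ | ⟨hr, rfl⟩ | ⟨hr, rfl⟩ | ⟨hr, rfl⟩ | ⟨hr, rfl⟩ | ⟨hr, rfl⟩ | ⟨hr, rfl⟩ <;>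
    simp only [hl, hr] <;>
    first
    | decide
    | simp [pvFindDesc, pvScale]
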